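-- pv_equiv track=rewrite | github.com/kcerauno/SLOT_AND_HMM | hypothesis/06_state_characterization/source/common.py | get_boundary_positions
-- ===== SOURCE A (Python) =====
-- def get_boundary_positions(splits: tuple) -> tuple[set, set]:
--     bd_end, bd_start = set(), set()
--     cumlen = 0
--     for base in splits[:-1]:
--         cumlen += len(base)
--         bd_end.add(cumlen - 1)
--         bd_start.add(cumlen)
--     return bd_end, bd_start
-- ===== SOURCE B (Python) =====
-- def get_boundary_positions(splits: tuple) -> tuple[set, set]:
--     # Each boundary position is the total length of a proper non-empty prefix of splits:
--     # compute it per boundary index directly, with no running accumulator.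
--     n = len(splits)
--     bd_start = {sum(len(b) for b in splits[:i]) for i in range(1, n)}
--     bd_end = {sum(len(b) for b in splits[:i]) - 1 for i in range(1, n)}
--     return bd_end, bd_start
-- ===== Notes on version B (the rewrite author's own statement) =====
-- stated objective: alternative
-- what changed: Replaces A's single accumulator loop maintaining both sets with direct per-boundary recomputation: each of the two sets is a comprehension over boundary indices i in range(1, len(splits)), with the position computed independently as sum(len(b) for b in splits[:i]); no running cumlen and no interleaved set updates (O(n^2) instead of O(n)).
import Mathlib
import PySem

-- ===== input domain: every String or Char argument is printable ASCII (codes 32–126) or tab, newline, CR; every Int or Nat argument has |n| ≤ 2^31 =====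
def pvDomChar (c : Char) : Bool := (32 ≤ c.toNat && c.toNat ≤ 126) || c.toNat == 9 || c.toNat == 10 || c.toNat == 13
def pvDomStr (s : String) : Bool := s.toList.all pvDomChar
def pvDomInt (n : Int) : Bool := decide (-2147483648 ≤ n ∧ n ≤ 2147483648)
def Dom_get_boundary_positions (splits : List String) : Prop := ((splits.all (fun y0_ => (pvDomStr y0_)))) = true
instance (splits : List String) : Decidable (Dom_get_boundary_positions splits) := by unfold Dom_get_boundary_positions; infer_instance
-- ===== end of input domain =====

-- B replaces A's running-accumulator loop (one pass maintaining both sets and a cumlen)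
-- with independent per-boundary recomputation: two set comprehensions over the boundary
-- indices i ∈ range(1, n), each position recomputed as sum(len of splits[:i]). Same values
-- on all inputs (proved); B trades the O(n) accumulator for an O(n^2) direct formulation.


-- ===== PORT A =====
def get_boundary_positions (splits : List String) : List Int × List Int :=
  let r := (PySem.List.slice splits none (some (-1))).foldl
    (fun (st : PySem.Set Int × PySem.Set Int × Int) base =>
      let cumlen := st.2.2 + PySem.Str.len base
      (PySem.Set.add st.1 (cumlen - 1), PySem.Set.add st.2.1 cumlen, cumlen))
    (PySem.Set.empty, PySem.Set.empty, 0)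
  (r.1, r.2.1)

-- ===== PORT B =====
-- sum(len(b) for b in splits[:i])
def pvPreSum (splits : List String) (i : Int) : Int :=
  ((PySem.List.slice splits none (some i)).map (fun b => PySem.Str.len b)).sum

def get_boundary_positions_alt (splits : List String) : List Int × List Int :=
  let n : Int := splits.length
  let bd_start := PySem.Set.ofList ((PySem.List.pyRange 1 n 1).map (fun i => pvPreSum splits i))
  let bd_end := PySem.Set.ofList ((PySem.List.pyRange 1 n 1).map (fun i => pvPreSum splits i - 1))
  (bd_end, bd_start)

-- ===== PRECONDITION & SPEC =====
def Spec_get_boundary_positions (splits : List String) (out : List Int × List Int) : Prop := out = get_boundary_positions_alt splits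
instance (splits : List String) (out : List Int × List Int) : Decidable (Spec_get_boundary_positions splits out) := by unfold Spec_get_boundary_positions; infer_instance

-- ===== CLAIM (what is proved, stated in full; the proofs are below) =====
def Claim_equal_get_boundary_positions : Prop := ∀ (splits : List String), Dom_get_boundary_positions splits → Spec_get_boundary_positions splits (get_boundary_positions splits)

-- ===== LEMMAS AND PROOFS =====

-- the prefix-sum sequence of the lengths of bs starting from c
def pvPf (c : Int) : List String → List Int
  | [] => []
  | b :: bs => (c + PySem.Str.len b) :: pvPf (c + PySem.Str.len b) bs

theorem pvA_fold (bs : List String) : ∀ (E S : PySem.Set Int) (c : Int),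
    (bs.foldl
      (fun (st : PySem.Set Int × PySem.Set Int × Int) base =>
        let cumlen := st.2.2 + PySem.Str.len base
        (PySem.Set.add st.1 (cumlen - 1), PySem.Set.add st.2.1 cumlen, cumlen)) (E, S, c)).1
      = ((pvPf c bs).map (fun s => s - 1)).foldl PySem.Set.add E
    ∧ (bs.foldl
      (fun (st : PySem.Set Int × PySem.Set Int × Int) base =>
        let cumlen := st.2.2 + PySem.Str.len base
        (PySem.Set.add st.1 (cumlen - 1), PySem.Set.add st.2.1 cumlen, cumlen)) (E, S, c)).2.1
      = (pvPf c bs).foldl PySem.Set.add S := by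
  induction bs with
  | nil => intro E S c; simp [pvPf]
  | cons b bs ih => intro E S c; simpa [pvPf] using ih _ _ _

-- B's per-index prefix sums over range(len t), shifted by c, are exactly pvPf c t
theorem pvK (t : List String) : ∀ (c : Int),
    (List.range t.length).map (fun k => c + ((t.take (k+1)).map (fun b => PySem.Str.len b)).sum)
      = pvPf c t := by
  induction t with
  | nil => intro c; simp [pvPf]
  | cons b t ih =>
    intro c
    rw [List.length_cons, List.range_succ_eq_map]
    simp only [List.map_cons, List.map_map, List.take_succ_cons, pvPf]
    refine congrArg₂ _ (by simp) ?_
    rw [← ih (c + PySem.Str.len b)]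
    refine List.map_congr_left ?_
    intro k _
    simp only [Function.comp_apply, Nat.succ_eq_add_one, List.sum_cons]
    ring

-- B's mapped index list equals pvPf 0 of splits[:-1]
theorem pvB_list (splits : List String) :
    (PySem.List.pyRange 1 (splits.length : Int) 1).map (fun i => pvPreSum splits i)
      = pvPf 0 splits.dropLast := by
  rw [PySem.List.pyRange_one, List.map_map]
  rw [← pvK splits.dropLast 0]
  have hlen : ((splits.length : Int) - 1).toNat = splits.dropLast.length := by
    simp [List.length_dropLast]
  rw [hlen]
  apply List.map_congr_left
  intro k hk
  have hk' : k < splits.dropLast.length := List.mem_range.mp hk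
  have hk2 : k + 1 ≤ splits.length - 1 := by
    simp [List.length_dropLast] at hk'; omega
  simp only [Function.comp]
  rw [pvPreSum, PySem.List.slice_to (xs := splits) (b := 1 + (k:Int)) (by omega)]
  have h1 : ((1 : Int) + k).toNat = k + 1 := by omega
  rw [h1, List.dropLast_eq_take, List.take_take]
  have : min (k+1) (splits.length - 1) = k + 1 := by omega
  rw [this]
  ring_nf

theorem pvOfList_eq (l : List Int) :
    PySem.Set.ofList l = l.foldl PySem.Set.add PySem.Set.empty := by
  rw [PySem.Set.ofList_eq_foldl]; rfl

-- ===== VERDICT (by name: the statement is the Claim_ definition above) =====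
theorem get_boundary_positions_spec : Claim_equal_get_boundary_positions := by
  intro splits _
  unfold Spec_get_boundary_positions get_boundary_positions get_boundary_positions_alt
  obtain ⟨h1, h2⟩ := pvA_fold (PySem.List.slice splits none (some (-1)))
    PySem.Set.empty PySem.Set.empty 0
  rw [PySem.List.slice_to_neg_one] at h1 h2
  have hmap : (PySem.List.pyRange 1 (splits.length : Int) 1).map (fun i => pvPreSum splits i - 1)
      = (pvPf 0 splits.dropLast).map (fun s => s - 1) := by
    rw [← pvB_list splits, List.map_map]; rfl
  simp only [PySem.List.slice_to_neg_one, h1, h2, pvB_list, hmap, pvOfList_eq]
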